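-- pv_equiv track=rewrite | github.com/douglasdecouto/ac34-ios | crc/crc32.py | create_table_reflected
-- ===== SOURCE A (Python) =====
-- def _reflect(val, width):
--     new_val = 0
--     for i in range(width):
--         if val & 1:
--             new_val |= (1 << (width - (i + 1)))
--         val >>= 1
--     return new_val
--
-- def create_table_reflected(poly):
--     table = [0]*256;
--     for i in range(256):
--         table[i] = _reflect(i, 8) << 24
--         for j in range(8):
--             if table[i] & (1 << 31):
--                 xor_mask = poly
--             else:
--                 xor_mask = 0
--             table[i] = ((table[i] << 1) & 0xFFffFFff) ^ xor_mask
--         table[i] = _reflect(table[i], 32)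
--
--     return table
-- ===== SOURCE B (Python) =====
-- def create_table_reflected(poly):
--     rpoly = 0
--     p = poly
--     for _ in range(32):
--         rpoly = (rpoly << 1) | (p & 1)
--         p >>= 1
--     table = []
--     for i in range(256):
--         crc = i
--         for _ in range(8):
--             if crc & 1:
--                 crc = (crc >> 1) ^ rpoly
--             else:
--                 crc >>= 1
--         table.append(crc)
--     return table
-- ===== Notes on version B (the rewrite author's own statement) =====
-- stated objective: alternative
-- what changed: B reflects the polynomial once up front and computes every table entry with LSB-first shift rounds in the reflected bit domain, eliminating A's per-entry bit-reversal loops and MSB-first masking.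
import Mathlib
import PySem

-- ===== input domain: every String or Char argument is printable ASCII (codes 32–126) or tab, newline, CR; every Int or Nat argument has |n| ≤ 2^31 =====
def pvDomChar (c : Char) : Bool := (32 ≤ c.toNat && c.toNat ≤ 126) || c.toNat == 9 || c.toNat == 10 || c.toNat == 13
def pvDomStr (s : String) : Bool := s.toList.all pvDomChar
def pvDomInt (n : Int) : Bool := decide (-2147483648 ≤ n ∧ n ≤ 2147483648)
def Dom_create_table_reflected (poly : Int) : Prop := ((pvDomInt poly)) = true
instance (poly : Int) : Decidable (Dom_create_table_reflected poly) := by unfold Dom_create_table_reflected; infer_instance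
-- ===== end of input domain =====

-- B computes the table directly in the reflected bit domain (one reflection of the
-- polynomial up front, then LSB-first shift rounds per entry), replacing A's two
-- per-entry bit-reversal loops; same table by the reflected-CRC conjugation identity.

-- ===== PORT A =====
-- _reflect(val, width): bit-reversal loop, transliterated (state = (new_val, val))
def pyReflect (val : Int) (width : Int) : Int :=
  ((PySem.List.pyRange 0 width 1).foldl
    (fun (st : Int × Int) i =>
      (if PySem.Int.band st.2 1 ≠ 0
         then PySem.Int.bor st.1 ((1 : Int) <<< (width - (i + 1)).toNat)
         else st.1,
       st.2 >>> (1 : Nat)))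
    (0, val)).1

-- table[i] is only ever read/written at the current index i, so it is kept in a
-- local accumulator between the three assignments and stored once with pySetD.
def create_table_reflected (poly : Int) : List Int :=
  (PySem.List.pyRange 0 256 1).foldl
    (fun table i =>
      let t0 := pyReflect i 8 <<< (24 : Nat)
      let t1 := (PySem.List.pyRange 0 8 1).foldl
        (fun t _j =>
          let xor_mask := if PySem.Int.band t ((1 : Int) <<< (31 : Nat)) ≠ 0 then poly else 0
          PySem.Int.bxor (PySem.Int.band (t <<< (1 : Nat)) 4294967295) xor_mask)
        t0
      PySem.List.pySetD table i (pyReflect t1 32))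
    (List.replicate 256 0)

-- ===== PORT B =====
def create_table_reflected_alt (poly : Int) : List Int :=
  let rpoly := ((PySem.List.pyRange 0 32 1).foldl
    (fun (st : Int × Int) _ =>
      (PySem.Int.bor (st.1 <<< (1 : Nat)) (PySem.Int.band st.2 1), st.2 >>> (1 : Nat)))
    (0, poly)).1
  (PySem.List.pyRange 0 256 1).foldl
    (fun table i =>
      let crc := (PySem.List.pyRange 0 8 1).foldl
        (fun crc _j =>
          if PySem.Int.band crc 1 ≠ 0
            then PySem.Int.bxor (crc >>> (1 : Nat)) rpoly
            else crc >>> (1 : Nat))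
        i
      table ++ [crc])
    []

-- ===== PRECONDITION & SPEC =====
def Spec_create_table_reflected (poly : Int) (out : List Int) : Prop := out = create_table_reflected_alt poly
instance (poly : Int) (out : List Int) : Decidable (Spec_create_table_reflected poly out) := by unfold Spec_create_table_reflected; infer_instance

-- ===== CLAIM (what is proved, stated in full; the proofs are below) =====
def Claim_equal_create_table_reflected : Prop := ∀ (poly : Int), Dom_create_table_reflected poly → Spec_create_table_reflected poly (create_table_reflected poly)

-- ===== LEMMAS AND PROOFS =====

def nref : Nat → Nat → Nat
  | 0, _ => 0
  | w+1, v => (v % 2) * 2^w + nref w (v / 2)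

theorem nref_lt (w v : Nat) : nref w v < 2^w := by
  induction w generalizing v with
  | zero => simp [nref]
  | succ w ih =>
    have h := ih (v / 2)
    have h2 : v % 2 ≤ 1 := by omega
    have h3 : (v % 2) * 2^w ≤ 2^w :=
      le_trans (Nat.mul_le_mul_right _ h2) (by omega)
    simp only [nref, pow_succ]
    omega

theorem testBit_low (b a w j : Nat) (hb : b < 2^w) (hj : j < w) :
    (b + 2^w * a).testBit j = b.testBit j := by
  have h1 : (b + 2^w * a) % 2^w = b := by
    rw [Nat.add_mul_mod_self_left, Nat.mod_eq_of_lt hb]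
  have h2 := Nat.testBit_mod_two_pow (b + 2^w * a) w j
  rw [h1] at h2
  rw [h2]
  simp [hj]

theorem nref_testBit (w : Nat) : ∀ (v j : Nat), j < w → (nref w v).testBit j = v.testBit (w-1-j) := by
  induction w with
  | zero => omega
  | succ w ih =>
    intro v j hj
    have hlt : nref w (v / 2) < 2^w := nref_lt w (v / 2)
    by_cases h : j = w
    · subst h
      have hdiv : nref (j+1) v / 2^j = v % 2 := by
        simp only [nref]
        rw [Nat.add_comm, Nat.add_mul_div_right _ _ (Nat.two_pow_pos j), Nat.div_eq_of_lt hlt]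
        omega
      have h0 := Nat.testBit_div_two_pow (n := j) (nref (j+1) v) 0
      rw [Nat.zero_add] at h0
      rw [← h0, hdiv]
      simp only [Nat.testBit_zero, Nat.add_sub_cancel, Nat.sub_self]
      rw [Nat.mod_mod_of_dvd v dvd_rfl]
    · have hjw : j < w := by omega
      have heq : (nref (w+1) v).testBit j = (nref w (v/2)).testBit j := by
        simp only [nref]
        rw [show (v % 2) * 2^w + nref w (v/2) = nref w (v/2) + 2^w * (v%2) from by ring]
        exact testBit_low _ _ _ _ hlt hjw
      rw [heq, ih (v/2) j hjw, show w+1-1-j = (w-1-j)+1 from by omega, Nat.testBit_succ]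

theorem nref_ge_false (w v j : Nat) (hj : w ≤ j) : (nref w v).testBit j = false :=
  Nat.testBit_lt_two_pow (lt_of_lt_of_le (nref_lt w v) (Nat.pow_le_pow_right (by norm_num) hj))

theorem nref_zero (w : Nat) : nref w 0 = 0 := by
  induction w with
  | zero => rfl
  | succ w ih => simp [nref, ih]

theorem nref_xor (w a b : Nat) : nref w (a ^^^ b) = nref w a ^^^ nref w b := by
  apply Nat.eq_of_testBit_eq
  intro j
  by_cases hj : j < w
  · rw [nref_testBit w _ j hj, Nat.testBit_xor, Nat.testBit_xor,
      nref_testBit w _ j hj, nref_testBit w _ j hj]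
  · rw [nref_ge_false _ _ _ (by omega), Nat.testBit_xor,
      nref_ge_false _ _ _ (by omega), nref_ge_false _ _ _ (by omega)]
    rfl

theorem nref_invol (w y : Nat) (hy : y < 2^w) : nref w (nref w y) = y := by
  apply Nat.eq_of_testBit_eq
  intro j
  by_cases hj : j < w
  · rw [nref_testBit w _ j hj, nref_testBit w _ _ (by omega), show w-1-(w-1-j) = j from by omega]
  · rw [nref_ge_false _ _ _ (by omega),
      Nat.testBit_lt_two_pow (lt_of_lt_of_le hy (Nat.pow_le_pow_right (by norm_num) (by omega)))]

theorem nref_succ (k : Nat) : ∀ v : Nat, nref (k+1) v = 2 * nref k v + (v.testBit k).toNat := by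
  induction k with
  | zero =>
    intro v
    rcases Nat.mod_two_eq_zero_or_one v with h|h <;>
      simp [nref, Nat.testBit_zero, h]
  | succ k ih =>
    intro v
    have h1 : nref (k+2) v = (v % 2) * 2^(k+1) + nref (k+1) (v / 2) := rfl
    have h3 : nref (k+1) v = (v % 2) * 2^k + nref k (v/2) := rfl
    rw [h1, ih (v/2), h3, Nat.testBit_succ, pow_succ]
    ring


theorem xor_mod_two_pow (x y n : Nat) : (x ^^^ y) % 2^n = (x % 2^n) ^^^ (y % 2^n) := by
  apply Nat.eq_of_testBit_eq
  intro j
  simp only [Nat.testBit_mod_two_pow, Nat.testBit_xor]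
  by_cases hj : j < n <;> simp [hj]

theorem xor_mask (x n : Nat) (h : x < 2^n) : x ^^^ (2^n-1) = 2^n - 1 - x := by
  apply Nat.eq_of_testBit_eq
  intro i
  rw [show 2^n-1-x = 2^n-(x+1) from by omega, Nat.testBit_two_pow_sub_succ h,
    Nat.testBit_xor, Nat.testBit_two_pow_sub_one]
  by_cases hi : i < n
  · simp [hi]
  · simp [hi, Nat.testBit_lt_two_pow (show x < 2^i from lt_of_lt_of_le h (Nat.pow_le_pow_right (by norm_num) (by omega)))]

theorem or_two_mul (m b : Nat) (hb : b < 2) : 2*m ||| b = 2*m + b := by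
  interval_cases b
  · simp
  · apply Nat.eq_of_testBit_eq
    intro i
    rw [Nat.testBit_or]
    cases i with
    | zero =>
      simp only [Nat.testBit_zero]
      have h1 : (2*m) % 2 = 0 := by omega
      have h2 : (2*m+1) % 2 = 1 := by omega
      simp [h1, h2]
    | succ i =>
      simp only [Nat.testBit_succ]
      rw [show 2*m/2 = m from by omega, show (2*m+1)/2 = m from by omega]
      norm_num

theorem mod_pow_succ_eq (q k : Nat) (h : q.testBit k = false) : q % 2^(k+1) = q % 2^k := by
  apply Nat.eq_of_testBit_eq
  intro j
  simp only [Nat.testBit_mod_two_pow]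
  by_cases hj : j < k
  · simp [hj, show j < k+1 from by omega]
  · by_cases hj2 : j = k
    · subst hj2; simp [h]
    · simp [hj, show ¬ (j < k+1) from by omega]

theorem nref_or_step (w q k : Nat) (hk : k < w) (h : q.testBit k = true) :
    nref w (q % 2^(k+1)) = nref w (q % 2^k) ||| 2^(w-1-k) := by
  apply Nat.eq_of_testBit_eq
  intro j
  by_cases hj : j < w
  · rw [nref_testBit w _ j hj, Nat.testBit_or, nref_testBit w _ j hj,
      Nat.testBit_mod_two_pow, Nat.testBit_mod_two_pow, Nat.testBit_two_pow]
    by_cases h1 : w-1-j = k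
    · have hjk : w-1-k = j := by omega
      simp [h1, hjk, h]
    · by_cases h2 : w-1-j < k
      · simp [h2, show w-1-j < k+1 from by omega, show ¬ (w-1-k = j) from by omega]
      · simp [h2, show ¬ (w-1-j < k+1) from by omega, show ¬ (w-1-k = j) from by omega]
  · rw [nref_ge_false _ _ _ (by omega), Nat.testBit_or, nref_ge_false _ _ _ (by omega),
      Nat.testBit_two_pow]
    simp [show ¬ (w-1-k = j) from by omega]

theorem testBit_two_mul (a j : Nat) : (2*a).testBit j = if j = 0 then false else a.testBit (j-1) := by
  cases j with
  | zero => simp [Nat.testBit_zero, Nat.mul_mod_right]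
  | succ j =>
    rw [Nat.testBit_succ, show 2*a/2 = a from by omega]
    simp

theorem nref8_shift (v : Nat) (h : v < 2^8) : nref 8 v * 2^24 = nref 32 v := by
  apply Nat.eq_of_testBit_eq
  intro j
  rw [Nat.testBit_mul_two_pow]
  by_cases hj32 : j < 32
  · rw [nref_testBit 32 _ j hj32]
    by_cases hj : 24 ≤ j
    · rw [nref_testBit 8 _ _ (show j - 24 < 8 from by omega)]
      simp [hj, show 8-1-(j-24) = 31-j from by omega]
    · simp only [show decide (24 ≤ j) = false from by simp [hj], Bool.false_and]
      rw [show (32:Nat)-1-j = 31-j from by omega]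
      exact (Nat.testBit_lt_two_pow (show v < 2^(31-j) from lt_of_lt_of_le h (Nat.pow_le_pow_right (by norm_num) (by omega)))).symm
  · rw [nref_ge_false 8 v (j-24) (by omega), nref_ge_false 32 v j (by omega)]
    simp

theorem nref32_half (y : Nat) (hy : y < 2^32) : nref 32 (y/2) = 2 * nref 32 y % 2^32 := by
  apply Nat.eq_of_testBit_eq
  intro j
  by_cases hj : j < 32
  · rw [nref_testBit 32 _ j hj]
    rw [Nat.testBit_mod_two_pow, testBit_two_mul]
    by_cases hj0 : j = 0
    · subst hj0
      simp only [show (32:Nat)-1-0 = 31 from rfl]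
      simp [Nat.testBit_lt_two_pow (show y/2 < 2^31 from by omega)]
    · rw [nref_testBit 32 _ _ (show j-1 < 32 from by omega)]
      have : (y/2).testBit (31-j) = y.testBit (31-j+1) := (Nat.testBit_succ y (31-j)).symm
      rw [this, show 31-j+1 = 32-1-(j-1) from by omega]
      simp [hj, hj0]
  · rw [nref_ge_false _ _ _ (by omega), Nat.testBit_mod_two_pow]
    simp [show ¬ (j < 32) from hj]

def lowW (w : Nat) (a : Int) : Nat := (a % (2:Int)^w).toNat

theorem lowW_lt (w : Nat) (a : Int) : lowW w a < 2^w := by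
  have h1 := Int.emod_lt_of_pos a (show (0:Int) < 2^w from by positivity)
  have h2 := Int.emod_nonneg a (show ((2:Int)^w) ≠ 0 from by positivity)
  unfold lowW
  have h3 : ((2:Int)^w) = ((2^w : Nat) : Int) := by push_cast; ring
  omega

theorem lowW_natCast (w : Nat) (m : Nat) : lowW w (m : Int) = m % 2^w := by
  unfold lowW
  have h3 : ((2:Int)^w) = ((2^w : Nat) : Int) := by push_cast; ring
  rw [h3, Int.ofNat_mod_ofNat]
  omega

def ilow (a : Int) : Nat := (a % 4294967296).toNat

theorem ilow_eq_lowW (a : Int) : ilow a = lowW 32 a := by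
  unfold ilow lowW
  norm_num

theorem ilow_lt (a : Int) : ilow a < 4294967296 := by
  unfold ilow
  omega

theorem ilow_natCast (m : Nat) : ilow (m : Int) = m % 4294967296 := by
  unfold ilow
  omega

theorem ilow_negSucc (m : Nat) : ilow (-(m:Int) - 1) = 4294967295 - m % 4294967296 := by
  unfold ilow
  omega

theorem ilow_of_lt (m : Nat) (h : m < 4294967296) : ilow (m : Int) = m := by
  rw [ilow_natCast]
  omega

theorem xor_xor_cancel (a b c : Nat) : (a^^^c)^^^(b^^^c) = a^^^b := by
  rw [Nat.xor_comm b c, ← Nat.xor_assoc, Nat.xor_assoc a c c, Nat.xor_self, Nat.xor_zero]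

theorem one_shl (m : Nat) : (1:Int) <<< m = ((2^m : Nat) : Int) := by
  rw [Int.shiftLeft_eq]
  push_cast
  ring

theorem shr_shr (a : Int) (j k : Nat) : (a >>> j) >>> k = a >>> (j+k) := by
  rw [Int.shiftRight_eq_div_pow, Int.shiftRight_eq_div_pow, Int.shiftRight_eq_div_pow,
    Int.ediv_ediv_of_nonneg (by positivity), ← Nat.cast_mul, ← pow_add]

theorem natCast_shr_one (y : Nat) : ((y:Int)) >>> (1:Nat) = ((y / 2 : Nat) : Int) := by
  rw [Int.shiftRight_eq_div_pow, Int.ofNat_ediv_ofNat]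

theorem natCast_shl (m k : Nat) : ((m:Int)) <<< k = ((m * 2^k : Nat) : Int) := by
  rw [Int.shiftLeft_eq]
  push_cast
  ring

theorem band_one_ne (x : Int) : (PySem.Int.band x 1 ≠ 0) ↔ x % 2 = 1 := by
  rw [PySem.Int.band_one, PySem.Int.mod_eq_emod_of_pos (by norm_num)]
  omega

theorem negSucc_eq' (m : Nat) : (Int.negSucc m) = -(m:Int) - 1 := by
  rw [Int.negSucc_eq]; ring

theorem band_mask (a : Int) : PySem.Int.band a 4294967295 = ((ilow a : Nat) : Int) := by
  rcases a with m | m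
  · have hc : Int.ofNat m = ((m:Nat):Int) := rfl
    rw [hc, ilow_natCast, show ((4294967295:Int)) = (((4294967295:Nat)):Int) from rfl,
      PySem.Int.band_natCast, show (4294967295:Nat) = 2^32 - 1 from by norm_num,
      Nat.and_two_pow_sub_one_eq_mod, show (4294967296:Nat) = 2^32 from by norm_num]
  · have h1 : ¬ (0:Int) ≤ Int.negSucc m := by
      rw [negSucc_eq']; omega
    have h2 : (-(Int.negSucc m) - 1).toNat = m := by
      rw [negSucc_eq']; omega
    simp only [PySem.Int.band, if_neg h1, if_pos (show (0:Int) ≤ 4294967295 from by norm_num), h2]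
    rw [negSucc_eq', ilow_negSucc]
    have h3 : (4294967295:Int).toNat = 4294967295 := rfl
    rw [h3, Nat.and_comm, show (4294967295:Nat) = 2^32 - 1 from by norm_num,
      Nat.and_two_pow_sub_one_eq_mod, show (4294967296:Nat) = 2^32 from by norm_num]

theorem band_bit31 (a : Int) : (PySem.Int.band a 2147483648 ≠ 0) ↔ (ilow a).testBit 31 = true := by
  rcases a with m | m
  · have hc : Int.ofNat m = ((m:Nat):Int) := rfl
    rw [hc, ilow_natCast, show ((2147483648:Int)) = (((2147483648:Nat)):Int) from rfl,
      PySem.Int.band_natCast, show (2147483648:Nat) = 2^31 from by norm_num,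
      Nat.and_two_pow, show (4294967296:Nat) = 2^32 from by norm_num,
      Nat.testBit_mod_two_pow]
    rcases Bool.eq_false_or_eq_true (m.testBit 31) with h | h <;> simp [h]
  · have h1 : ¬ (0:Int) ≤ Int.negSucc m := by rw [negSucc_eq']; omega
    have h2 : (-(Int.negSucc m) - 1).toNat = m := by rw [negSucc_eq']; omega
    simp only [PySem.Int.band, if_neg h1, if_pos (show (0:Int) ≤ 2147483648 from by norm_num), h2]
    rw [negSucc_eq', ilow_negSucc]
    have h3 : (2147483648:Int).toNat = 2147483648 := rfl
    rw [h3, Nat.and_comm, show (2147483648:Nat) = 2^31 from by norm_num, Nat.and_two_pow]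
    have h5 : 4294967295 - m % 4294967296 = (m % 2^32) ^^^ (2^32 - 1) := by
      rw [xor_mask _ _ (Nat.mod_lt _ (by norm_num))]
      norm_num
    rw [h5, Nat.testBit_xor, Nat.testBit_two_pow_sub_one, Nat.testBit_mod_two_pow]
    rcases Bool.eq_false_or_eq_true (m.testBit 31) with h | h <;> simp [h]

theorem mod32_xor (m k : Nat) : (m ^^^ k) % 4294967296 = m % 4294967296 ^^^ k % 4294967296 := by
  rw [show (4294967296:Nat) = 2^32 from by norm_num, xor_mod_two_pow]

theorem sub_mod32_eq_xor (m : Nat) : 4294967295 - m % 4294967296 = (m % 4294967296) ^^^ 4294967295 := by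
  rw [show (4294967296:Nat) = 2^32 from by norm_num,
    show (4294967295:Nat) = 2^32 - 1 from by norm_num,
    xor_mask _ _ (Nat.mod_lt _ (by norm_num))]

theorem ilow_bxor (a b : Int) : ilow (PySem.Int.bxor a b) = ilow a ^^^ ilow b := by
  rcases a with m | m <;> rcases b with k | k
  · have hc : Int.ofNat m = ((m:Nat):Int) := rfl
    have hc2 : Int.ofNat k = ((k:Nat):Int) := rfl
    rw [hc, hc2, PySem.Int.bxor_natCast, ilow_natCast, ilow_natCast, ilow_natCast, mod32_xor]
  · have h1 : (0:Int) ≤ Int.ofNat m := Int.natCast_nonneg m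
    have h2 : ¬ (0:Int) ≤ Int.negSucc k := by rw [negSucc_eq']; omega
    have h3 : (-(Int.negSucc k) - 1).toNat = k := by rw [negSucc_eq']; omega
    have h4 : (Int.ofNat m).toNat = m := rfl
    simp only [PySem.Int.bxor, if_pos h1, if_neg h2, h3, h4]
    rw [show -((m ^^^ k : Nat) : Int) - 1 = -(((m ^^^ k : Nat)):Int) - 1 from rfl, ilow_negSucc]
    have hc : Int.ofNat m = ((m:Nat):Int) := rfl
    rw [hc, ilow_natCast, negSucc_eq', ilow_negSucc, sub_mod32_eq_xor, sub_mod32_eq_xor, mod32_xor,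
      Nat.xor_assoc]
  · have h1 : ¬ (0:Int) ≤ Int.negSucc m := by rw [negSucc_eq']; omega
    have h2 : (0:Int) ≤ Int.ofNat k := Int.natCast_nonneg k
    have h3 : (-(Int.negSucc m) - 1).toNat = m := by rw [negSucc_eq']; omega
    have h4 : (Int.ofNat k).toNat = k := rfl
    simp only [PySem.Int.bxor, if_pos h2, if_neg h1, h3, h4]
    rw [show -((m ^^^ k : Nat) : Int) - 1 = -(((m ^^^ k : Nat)):Int) - 1 from rfl, ilow_negSucc]
    have hc : Int.ofNat k = ((k:Nat):Int) := rfl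
    rw [hc, ilow_natCast, negSucc_eq', ilow_negSucc, sub_mod32_eq_xor, sub_mod32_eq_xor, mod32_xor]
    rw [Nat.xor_comm (m % 4294967296 ^^^ 4294967295) (k % 4294967296), Nat.xor_comm (m % 4294967296) (k % 4294967296)]
    rw [← Nat.xor_assoc, Nat.xor_comm (k % 4294967296) (m % 4294967296), Nat.xor_assoc]
  · have h1 : ¬ (0:Int) ≤ Int.negSucc m := by rw [negSucc_eq']; omega
    have h2 : ¬ (0:Int) ≤ Int.negSucc k := by rw [negSucc_eq']; omega
    have h3 : (-(Int.negSucc m) - 1).toNat = m := by rw [negSucc_eq']; omega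
    have h4 : (-(Int.negSucc k) - 1).toNat = k := by rw [negSucc_eq']; omega
    simp only [PySem.Int.bxor, if_neg h1, if_neg h2, h3, h4]
    rw [ilow_natCast, negSucc_eq', negSucc_eq', ilow_negSucc, ilow_negSucc,
      sub_mod32_eq_xor, sub_mod32_eq_xor, mod32_xor, xor_xor_cancel]

theorem ilow_shl1 (a : Int) : ilow (a <<< (1:Nat)) = 2 * ilow a % 4294967296 := by
  unfold ilow
  rw [Int.shiftLeft_eq]
  have : a * 2^(1:Nat) = 2 * a := by ring
  rw [this]
  omega

theorem ilow_bxor_zero (a : Int) : PySem.Int.bxor a 0 = a := by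
  simp [pysem]

theorem lowW_half (w : Nat) (a : Int) : lowW w (a >>> (1:Nat)) = lowW (w+1) a / 2 := by
  have hP : ((2:Int)^(w+1)) = 2 * 2^w := by ring
  have hr0 := Int.emod_nonneg a (show ((2:Int)^(w+1)) ≠ 0 from by positivity)
  have hr1 := Int.emod_lt_of_pos a (show (0:Int) < 2^(w+1) from by positivity)
  have hd : a = a % 2^(w+1) + 2 * (2^w * (a / 2^(w+1))) := by
    have h := Int.emod_def a ((2:Int)^(w+1))
    have h2 : (2:Int)^(w+1) * (a / 2^(w+1)) = 2 * (2^w * (a / 2^(w+1))) := by ring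
    omega
  have hdiv : a >>> (1:Nat) = a / 2 := by
    rw [Int.shiftRight_eq_div_pow]
    norm_num
  have step : a / 2 = a % 2^(w+1) / 2 + 2^w * (a / 2^(w+1)) := by
    conv_lhs => rw [hd]
    rw [Int.add_mul_ediv_left _ _ (by norm_num : (2:Int) ≠ 0)]
  have hlt : a % 2^(w+1) / 2 < 2^w := by
    rw [Int.ediv_lt_iff_lt_mul (by norm_num : (0:Int) < 2)]
    rw [hP] at hr1
    omega
  have hge : 0 ≤ a % 2^(w+1) / 2 := Int.ediv_nonneg hr0 (by norm_num)
  unfold lowW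
  rw [hdiv, step, Int.add_mul_emod_self_left, Int.emod_eq_of_lt hge hlt]
  omega

theorem bit_iff (k : Nat) : ∀ (w : Nat) (a : Int), k < w →
    (((a >>> k) % 2 = 1) ↔ (lowW w a).testBit k = true) := by
  induction k with
  | zero =>
    intro w a hw
    have hq0 := Int.emod_nonneg a (show ((2:Int)^w) ≠ 0 from by positivity)
    have he : (a % 2^w) % 2 = a % 2 :=
      Int.emod_emod_of_dvd a (dvd_pow_self 2 (by omega : w ≠ 0))
    rw [Int.shiftRight_zero, Nat.testBit_zero]
    unfold lowW
    simp only [decide_eq_true_eq]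
    omega
  | succ k ih =>
    intro w a hw
    obtain ⟨w', rfl⟩ : ∃ w', w = w' + 1 := ⟨w - 1, by omega⟩
    have h1 : a >>> (k+1) = (a >>> (1:Nat)) >>> k := by
      rw [shr_shr a 1 k, Nat.add_comm 1 k]
    rw [h1, ih w' (a >>> (1:Nat)) (by omega), lowW_half, Nat.testBit_succ]
theorem pyReflect_inv (w : Nat) (v : Int) : ∀ k, k ≤ w →
    List.foldl
      (fun (st : Int × Int) i =>
        (if PySem.Int.band st.2 1 ≠ 0
           then PySem.Int.bor st.1 ((1 : Int) <<< (((w:Int)) - (i + 1)).toNat)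
           else st.1,
         st.2 >>> (1 : Nat)))
      (0, v)
      (List.map (fun j : Nat => (j : Int)) (List.range k))
    = (((nref w (lowW w v % 2^k) : Nat) : Int), v >>> k) := by
  intro k
  induction k with
  | zero =>
    intro _
    simp [nref_zero, Nat.mod_one, Int.shiftRight_zero]
  | succ k ih =>
    intro hk
    rw [List.range_succ, List.map_append, List.foldl_append, ih (by omega)]
    simp only [List.map_cons, List.map_nil, List.foldl_cons, List.foldl_nil]
    have hsh : (((w:Int)) - ((k:Int) + 1)).toNat = w - 1 - k := by omega
    have hsnd : (v >>> k) >>> (1:Nat) = v >>> (k+1) := by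
      rw [shr_shr v k 1]
    rw [hsh]
    by_cases hb : PySem.Int.band (v >>> k) 1 ≠ 0
    · have htb : (lowW w v).testBit k = true := ((bit_iff k w v (by omega)).mp ((band_one_ne _).mp hb))
      rw [if_pos hb, one_shl, PySem.Int.bor_natCast, hsnd, nref_or_step w _ k (by omega) htb]
    · have htb : (lowW w v).testBit k = false := by
        rcases Bool.eq_false_or_eq_true ((lowW w v).testBit k) with h | h
        · exact absurd ((band_one_ne _).mpr ((bit_iff k w v (by omega)).mpr h)) hb
        · exact h
      rw [if_neg hb, hsnd, mod_pow_succ_eq _ _ htb]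

theorem pyReflect_char (w : Nat) (v : Int) :
    pyReflect v ((w:Nat) : Int) = ((nref w (lowW w v) : Nat) : Int) := by
  unfold pyReflect
  rw [PySem.List.pyRange_zero_natCast, pyReflect_inv w v w le_rfl]
  rw [Nat.mod_eq_of_lt (lowW_lt w v)]

theorem rpoly_inv (p : Int) : ∀ k, k ≤ 32 →
    List.foldl
      (fun (st : Int × Int) _ =>
        (PySem.Int.bor (st.1 <<< (1 : Nat)) (PySem.Int.band st.2 1), st.2 >>> (1 : Nat)))
      (0, p)
      (List.map (fun j : Nat => (j : Int)) (List.range k))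
    = (((nref k (ilow p) : Nat) : Int), p >>> k) := by
  intro k
  induction k with
  | zero =>
    intro _
    simp [nref, Int.shiftRight_zero]
  | succ k ih =>
    intro hk
    rw [List.range_succ, List.map_append, List.foldl_append, ih (by omega)]
    simp only [List.map_cons, List.map_nil, List.foldl_cons, List.foldl_nil]
    have hcast : ((nref k (ilow p) : Nat) : Int) <<< (1:Nat) = ((2 * nref k (ilow p) : Nat) : Int) := by
      rw [natCast_shl, show nref k (ilow p) * 2^1 = 2 * nref k (ilow p) from by ring]
    have hsnd : (p >>> k) >>> (1:Nat) = p >>> (k+1) := by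
      rw [shr_shr p k 1]
    have hb1 : PySem.Int.band (p >>> k) 1 = (p >>> k) % 2 := by
      rw [PySem.Int.band_one, PySem.Int.mod_eq_emod_of_pos (by norm_num)]
    have hmod2 : (p >>> k) % 2 = 0 ∨ (p >>> k) % 2 = 1 := by omega
    rw [hcast, hsnd, hb1]
    by_cases htb : (ilow p).testBit k = true
    · have h1 : (p >>> k) % 2 = 1 := by
        rw [ilow_eq_lowW] at htb
        exact (bit_iff k 32 p (by omega)).mpr htb
      rw [h1, show ((1:Int)) = (((1:Nat)):Int) from rfl, PySem.Int.bor_natCast,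
        or_two_mul _ 1 (by norm_num), nref_succ, htb]
      simp
    · have h0 : (p >>> k) % 2 = 0 := by
        rcases hmod2 with h | h
        · exact h
        · exact absurd ((bit_iff k 32 p (by omega)).mp h) (by rw [ilow_eq_lowW] at htb; exact htb)
      have htb' : (ilow p).testBit k = false := by
        rcases Bool.eq_false_or_eq_true ((ilow p).testBit k) with h | h
        · exact absurd h htb
        · exact h
      rw [h0, PySem.Int.bor_zero, nref_succ, htb']
      norm_num

def natStep (q y : Nat) : Nat := if y.testBit 0 then y / 2 ^^^ nref 32 q else y / 2

theorem natStep_lt (q y : Nat) (hy : y < 4294967296) : natStep q y < 4294967296 := by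
  unfold natStep
  have h1 : nref 32 q < 2^32 := nref_lt 32 q
  have h2 : y / 2 < 2^32 := by omega
  by_cases h : y.testBit 0 = true
  · rw [if_pos h]
    have hx : y / 2 ^^^ nref 32 q < 2^32 := Nat.xor_lt_two_pow h2 h1
    omega
  · rw [if_neg h]
    omega

theorem stepA_rel (poly x : Int) (y : Nat) (hy : y < 4294967296) (hxy : ilow x = nref 32 y) :
    ilow (PySem.Int.bxor (PySem.Int.band (x <<< (1:Nat)) 4294967295)
            (if PySem.Int.band x ((1:Int) <<< (31:Nat)) ≠ 0 then poly else 0))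
      = nref 32 (natStep (ilow poly) y) := by
  have hmask : (1:Int) <<< (31:Nat) = 2147483648 := by decide
  have hcond : (PySem.Int.band x ((1:Int) <<< (31:Nat)) ≠ 0) ↔ y.testBit 0 = true := by
    rw [hmask, band_bit31, hxy, nref_testBit 32 y 31 (by norm_num)]
  have hu : PySem.Int.band (x <<< (1:Nat)) 4294967295 = ((ilow (x <<< (1:Nat)) : Nat) : Int) :=
    band_mask _
  have hu2 : ilow (x <<< (1:Nat)) = 2 * nref 32 y % 4294967296 := by
    rw [ilow_shl1, hxy]
  have hhalf : nref 32 (y/2) = 2 * nref 32 y % 4294967296 := by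
    rw [nref32_half y (by norm_num; omega)]
    norm_num
  by_cases hb : y.testBit 0 = true
  · rw [if_pos (hcond.mpr hb), ilow_bxor, hu, ilow_of_lt _ (by rw [hu2]; omega), hu2]
    unfold natStep
    rw [if_pos hb, nref_xor, nref_invol 32 (ilow poly) (by have := ilow_lt poly; norm_num; omega), hhalf]
  · rw [if_neg (by rw [hcond]; simp [hb]), ilow_bxor_zero, hu, ilow_of_lt _ (by rw [hu2]; omega), hu2]
    unfold natStep
    rw [if_neg (by simp [hb]), hhalf]

theorem foldA_rel (poly : Int) : ∀ (l : List Int) (x : Int) (y : Nat),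
    y < 4294967296 → ilow x = nref 32 y →
    (l.foldl (fun y' _ => natStep (ilow poly) y') y < 4294967296 ∧
     ilow (l.foldl
        (fun t _j =>
          let xor_mask := if PySem.Int.band t ((1 : Int) <<< (31 : Nat)) ≠ 0 then poly else 0
          PySem.Int.bxor (PySem.Int.band (t <<< (1 : Nat)) 4294967295) xor_mask) x
        ) = nref 32 (l.foldl (fun y' _ => natStep (ilow poly) y') y)) := by
  intro l
  induction l with
  | nil => intro x y hy hxy; exact ⟨hy, hxy⟩
  | cons a l ih =>
    intro x y hy hxy
    simp only [List.foldl_cons]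
    exact ih _ _ (natStep_lt _ _ hy) (stepA_rel poly x y hy hxy)

theorem foldB_lift (rp : Nat) : ∀ (l : List Int) (y : Nat),
    l.foldl
      (fun crc _j =>
        if PySem.Int.band crc 1 ≠ 0
          then PySem.Int.bxor (crc >>> (1 : Nat)) ((rp : Nat) : Int)
          else crc >>> (1 : Nat)) ((y : Nat) : Int)
    = (((l.foldl (fun y' _ => if y'.testBit 0 then y' / 2 ^^^ rp else y' / 2) y : Nat)) : Int) := by
  intro l
  induction l with
  | nil => intro y; rfl
  | cons a l ih =>
    intro y
    simp only [List.foldl_cons]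
    have hc : (PySem.Int.band ((y:Nat):Int) 1 ≠ 0) ↔ y.testBit 0 = true := by
      rw [band_one_ne, Nat.testBit_zero]
      simp only [decide_eq_true_eq]
      omega
    by_cases hb : y.testBit 0 = true
    · rw [if_pos (hc.mpr hb), natCast_shr_one, PySem.Int.bxor_natCast, if_pos hb, ih]
    · rw [if_neg (by rw [hc]; simp [hb]), natCast_shr_one, if_neg (by simp [hb]), ih]

theorem pySetD_natCast (l : List Int) (k : Nat) (v : Int) (h : k < l.length) :
    PySem.List.pySetD l ((k:Nat):Int) v = l.set k v := by
  unfold PySem.List.pySetD PySem.List.pySet? PySem.List.pyIdx?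
  rw [if_pos (by positivity), if_pos (by exact_mod_cast h)]
  simp

theorem foldl_set_inv (g : Int → Int) (n : Nat) : ∀ k, k ≤ n →
    List.foldl (fun t i => PySem.List.pySetD t i (g i)) (List.replicate n (0:Int))
      (List.map (fun j : Nat => (j:Int)) (List.range k))
    = List.map (fun j : Nat => g ((j:Nat):Int)) (List.range k) ++ List.replicate (n-k) 0 := by
  intro k
  induction k with
  | zero => intro _; simp
  | succ k ih =>
    intro hk
    rw [List.range_succ, List.map_append, List.foldl_append, ih (by omega)]
    simp only [List.map_cons, List.map_nil, List.foldl_cons, List.foldl_nil]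
    have hlen : (List.map (fun j : Nat => g ((j:Nat):Int)) (List.range k)).length = k := by
      simp
    have hrep : List.replicate (n-k) (0:Int) = 0 :: List.replicate (n-(k+1)) 0 := by
      rw [show n-k = (n-(k+1))+1 from by omega, List.replicate_succ]
    rw [hrep, pySetD_natCast _ k _ (by simp [hlen]),
      List.set_append_right _ _ (by omega), hlen, Nat.sub_self,
      List.set_cons_zero, List.map_append]
    simp

def innerA (poly : Int) : Int → Int := fun i =>
  pyReflect ((PySem.List.pyRange 0 8 1).foldl
    (fun t _j =>
      PySem.Int.bxor (PySem.Int.band (t <<< (1 : Nat)) 4294967295)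
        (if PySem.Int.band t ((1 : Int) <<< (31 : Nat)) ≠ 0 then poly else 0))
    (pyReflect i 8 <<< (24 : Nat))) 32

def rpolyI (poly : Int) : Int :=
  ((PySem.List.pyRange 0 32 1).foldl
    (fun (st : Int × Int) _ =>
      (PySem.Int.bor (st.1 <<< (1 : Nat)) (PySem.Int.band st.2 1), st.2 >>> (1 : Nat)))
    (0, poly)).1

def innerB (poly : Int) : Int → Int := fun i =>
  (PySem.List.pyRange 0 8 1).foldl
    (fun crc _j =>
      if PySem.Int.band crc 1 ≠ 0
        then PySem.Int.bxor (crc >>> (1 : Nat)) (rpolyI poly)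
        else crc >>> (1 : Nat)) i

theorem A_unfold (poly : Int) :
    create_table_reflected poly = List.map (fun j : Nat => innerA poly ((j:Nat):Int)) (List.range 256) := by
  show List.foldl (fun table i => PySem.List.pySetD table i (innerA poly i))
      (List.replicate 256 0) (PySem.List.pyRange 0 256 1) = _
  rw [show (256:Int) = ((256:Nat):Int) from rfl, PySem.List.pyRange_zero_natCast,
    foldl_set_inv _ 256 256 le_rfl]
  simp

theorem rpolyI_char (poly : Int) : rpolyI poly = ((nref 32 (ilow poly) : Nat) : Int) := by
  unfold rpolyI
  rw [show (32:Int) = ((32:Nat):Int) from rfl, PySem.List.pyRange_zero_natCast,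
    rpoly_inv poly 32 le_rfl]

theorem B_unfold (poly : Int) :
    create_table_reflected_alt poly = List.map (fun j : Nat => innerB poly ((j:Nat):Int)) (List.range 256) := by
  show List.foldl (fun table i => table ++ [innerB poly i]) [] (PySem.List.pyRange 0 256 1) = _
  rw [show (256:Int) = ((256:Nat):Int) from rfl, PySem.List.pyRange_zero_natCast,
    PySem.List.foldl_append_singleton_eq_map]
  simp

theorem entry_eq (poly : Int) (j : Nat) (hj : j < 256) :
    innerA poly ((j:Nat):Int) = innerB poly ((j:Nat):Int) := by
  have hx0 : pyReflect ((j:Nat):Int) 8 <<< (24:Nat) = ((nref 32 j : Nat) : Int) := by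
    rw [show (8:Int) = ((8:Nat):Int) from rfl, pyReflect_char 8 ((j:Nat):Int), lowW_natCast,
      Nat.mod_eq_of_lt (show j < 2^8 from by omega), natCast_shl, nref8_shift j (by omega)]
  have hilow : ilow (pyReflect ((j:Nat):Int) 8 <<< (24:Nat)) = nref 32 j := by
    rw [hx0]
    exact ilow_of_lt _ (by have := nref_lt 32 j; omega)
  have hrel := foldA_rel poly (PySem.List.pyRange 0 8 1)
    (pyReflect ((j:Nat):Int) 8 <<< (24:Nat)) j (by omega) hilow
  unfold innerA
  rw [show (32:Int) = ((32:Nat):Int) from rfl, pyReflect_char 32 _, ← ilow_eq_lowW, hrel.2,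
    nref_invol 32 _ (by have := hrel.1; norm_num; omega)]
  unfold innerB
  rw [rpolyI_char]
  have hfold := foldB_lift (nref 32 (ilow poly)) (PySem.List.pyRange 0 8 1) j
  rw [hfold]
  congr 1

theorem tables_eq (poly : Int) : create_table_reflected poly = create_table_reflected_alt poly := by
  rw [A_unfold, B_unfold]
  apply List.map_congr_left
  intro j hj
  exact entry_eq poly j (List.mem_range.mp hj)

-- ===== VERDICT (by name: the statement is the Claim_ definition above) =====
theorem create_table_reflected_spec : Claim_equal_create_table_reflected := by
  intro poly _
  unfold Spec_create_table_reflected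
  exact tables_eq poly
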